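-- pv_equiv track=rewrite | github.com/Kittonn/Programming-Solving | Programming.in.th/[1007]-Bee.py | B
-- ===== SOURCE A (Python) =====
-- def B(year):
--     a = 1
--     b = 1
--     c = 0
--     if year >= 0:
--         for i in range(year):
--             new_b = b + c + 1
--             new_c = b
--             b = new_b
--             c = new_c
--         total = a + b + c
--         return '{:d} {:d}'.format(b, total)
-- ===== SOURCE B (Python) =====
-- def B(year):
--     if year >= 0:
--         def fd(n):
--             # fast doubling: returns (fib(n), fib(n+1))
--             if n == 0:
--                 return (0, 1)
--             a, b = fd(n // 2)
--             c = a * (2 * b - a)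
--             d = a * a + b * b
--             if n % 2 == 0:
--                 return (c, d)
--             else:
--                 return (d, c + d)
--         f, g = fd(year + 3)
--         return '{:d} {:d}'.format(f - 1, g - 1)
-- ===== Notes on version B (the rewrite author's own statement) =====
-- stated objective: faster
-- what changed: Replaces the linear-recurrence loop (one iteration per year) by fast-doubling Fibonacci via the closed form b = fib(year+3)-1, total = fib(year+4)-1; intended as faster, measured 7.3x at the largest size both programs finished (on huge years A times out while B reaches CPython's int-to-str digit guard in the final formatting).
-- outside the precondition, e.g. on B(-1): A returns None, B returns None
import Mathlib
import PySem

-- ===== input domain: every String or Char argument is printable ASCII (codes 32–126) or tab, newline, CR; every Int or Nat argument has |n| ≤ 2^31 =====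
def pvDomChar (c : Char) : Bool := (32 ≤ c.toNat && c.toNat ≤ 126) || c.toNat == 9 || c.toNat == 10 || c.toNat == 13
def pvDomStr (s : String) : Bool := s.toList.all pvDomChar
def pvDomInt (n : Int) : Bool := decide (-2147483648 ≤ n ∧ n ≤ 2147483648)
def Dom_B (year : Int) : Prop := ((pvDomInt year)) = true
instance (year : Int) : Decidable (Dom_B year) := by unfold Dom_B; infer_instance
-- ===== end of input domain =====

-- B computes the answer by fast-doubling Fibonacci instead of iterating the recurrence (intended as faster; a timing run measured 7.3x at the largest size both finished); return values proved equal on nonnegative year.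

-- ===== PORT A =====
-- literal port of A's loop: state (b, c), year iterations; a = 1 stays constant
def B (year : Int) : String :=
  let a : Int := 1
  let bc := (PySem.List.pyRange 0 year 1).foldl
    (fun (s : Int × Int) _ => (s.1 + s.2 + 1, s.1)) (1, 0)
  PySem.Int.toStr bc.1 ++ " " ++ PySem.Int.toStr (a + bc.1 + bc.2)

-- ===== PORT B =====
-- fast doubling: fdAux n = (fib n, fib (n+1)), transliterating Source B's fd
def fdAux (n : Nat) : Int × Int :=
  if h : n = 0 then (0, 1)
  else
    let p := fdAux (n / 2)
    let c := p.1 * (2 * p.2 - p.1)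
    let d := p.1 * p.1 + p.2 * p.2
    if n % 2 = 0 then (c, d) else (d, c + d)
decreasing_by exact Nat.div_lt_self (Nat.pos_of_ne_zero h) (by norm_num)

def B_alt (year : Int) : String :=
  let p := fdAux ((year + 3).toNat)
  PySem.Int.toStr (p.1 - 1) ++ " " ++ PySem.Int.toStr (p.2 - 1)

-- ===== PRECONDITION & SPEC =====
-- Pre_ excludes negative year: there A falls through its `if` and returns None, not a string.
def Pre_B (year : Int) : Prop := 0 ≤ year
instance (year : Int) : Decidable (Pre_B year) := by unfold Pre_B; infer_instance
def pvWitness_B : Int := (5)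

def Spec_B (year : Int) (out : String) : Prop := out = B_alt year
instance (year : Int) (out : String) : Decidable (Spec_B year out) := by unfold Spec_B; infer_instance

-- ===== CLAIM (what is proved, stated in full; the proofs are below) =====
def Claim_equal_B : Prop := ∀ (year : Int), Dom_B year → Pre_B year → Spec_B year (B year)

-- ===== LEMMAS AND PROOFS =====

lemma fdAux_eq (n : Nat) : fdAux n = ((Nat.fib n : Int), (Nat.fib (n + 1) : Int)) := by
  induction n using Nat.strong_induction_on with
  | _ n ih =>
    rw [fdAux]
    by_cases h : n = 0
    · simp [h]
    · have hk := ih (n / 2) (Nat.div_lt_self (Nat.pos_of_ne_zero h) (by norm_num))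
      rw [dif_neg h, hk]
      set k := n / 2 with hkdef
      have hfle : Nat.fib k ≤ 2 * Nat.fib (k + 1) :=
        le_trans (Nat.fib_le_fib_succ) (by omega)
      have h2m : (Nat.fib (2 * k) : Int) = (Nat.fib k : Int) * (2 * (Nat.fib (k + 1) : Int) - (Nat.fib k : Int)) := by
        have := Nat.fib_two_mul k
        zify [hfle] at this
        linarith [this]
      have h2m1 : (Nat.fib (2 * k + 1) : Int) = (Nat.fib k : Int) * (Nat.fib k : Int) + (Nat.fib (k + 1) : Int) * (Nat.fib (k + 1) : Int) := by
        have := Nat.fib_two_mul_add_one k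
        zify at this
        rw [this]; ring
      by_cases hp : n % 2 = 0
      · have hn : n = 2 * k := by omega
        rw [if_pos hp, hn, h2m, h2m1]
      · have hn : n = 2 * k + 1 := by omega
        have h2m2 : (Nat.fib (2 * k + 2) : Int) = (Nat.fib (2 * k) : Int) + (Nat.fib (2 * k + 1) : Int) := by
          have := Nat.fib_add_two (n := 2 * k)
          zify at this
          linarith [this]
        rw [if_neg hp, hn]
        simp only [Prod.mk.injEq]
        constructor
        · rw [h2m1]
        · rw [show 2 * k + 1 + 1 = 2 * k + 2 from rfl, h2m2, h2m, h2m1]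

lemma loop_eq (n : Nat) :
    (PySem.List.pyRange 0 (n : Int) 1).foldl
      (fun (s : Int × Int) _ => (s.1 + s.2 + 1, s.1)) (1, 0)
    = ((Nat.fib (n + 3) : Int) - 1, (Nat.fib (n + 2) : Int) - 1) := by
  induction n with
  | zero => decide
  | succ m ih =>
    have h : ((m : Int) + 1) = ((m + 1 : Nat) : Int) := by push_cast; ring
    rw [← h, PySem.List.pyRange_one_succ_right (by positivity), List.foldl_append, ih]
    simp only [List.foldl, Prod.mk.injEq]
    have hfib : (Nat.fib (m + 4) : Int) = (Nat.fib (m + 2) : Int) + (Nat.fib (m + 3) : Int) := by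
      have := Nat.fib_add_two (n := m + 2)
      zify at this; linarith [this]
    constructor
    · show (Nat.fib (m + 3) : Int) - 1 + ((Nat.fib (m + 2) : Int) - 1) + 1 = (Nat.fib (m + 1 + 3) : Int) - 1
      rw [show m + 1 + 3 = m + 4 from rfl, hfib]; ring
    · trivial

-- ===== VERDICT (by name: the statement is the Claim_ definition above) =====
theorem B_spec : Claim_equal_B := by
  intro year _ hpre
  unfold Spec_B
  obtain ⟨n, rfl⟩ : ∃ n : Nat, year = (n : Int) := ⟨year.toNat, (Int.toNat_of_nonneg hpre).symm⟩
  unfold B B_alt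
  have h3 : ((n : Int) + 3).toNat = n + 3 := by omega
  rw [loop_eq n, h3, fdAux_eq]
  show PySem.Int.toStr ((Nat.fib (n + 3) : Int) - 1) ++ " " ++
        PySem.Int.toStr ((1 : Int) + ((Nat.fib (n + 3) : Int) - 1) + ((Nat.fib (n + 2) : Int) - 1))
      = PySem.Int.toStr ((Nat.fib (n + 3) : Int) - 1) ++ " " ++
        PySem.Int.toStr ((Nat.fib (n + 3 + 1) : Int) - 1)
  congr 1
  apply congrArg
  have hfib : (Nat.fib (n + 4) : Int) = (Nat.fib (n + 2) : Int) + (Nat.fib (n + 3) : Int) := by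
    have := Nat.fib_add_two (n := n + 2)
    zify at this; linarith [this]
  rw [show n + 3 + 1 = n + 4 from rfl, hfib]; ring
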